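-- pv_equiv track=rewrite | github.com/apapangelapeng/Group-1-Amoeba | players/g3_player.py | get_left_row
-- ===== SOURCE A (Python) =====
-- def get_left_row(periphery):
--     # Credit: G8
--     # Gets left row of amoeba to be retracted
--     # For each y coord, we want the one with the lowest x coord
--
--     top_row_vals = {} # key: y, value: x
--     for (x, y) in periphery:
--         if y in top_row_vals:
--             if x < top_row_vals[y]:
--                 top_row_vals[y] = x
--         else:
--             top_row_vals[y] = x
--
--     top_row = []
--     for key, val in top_row_vals.items():
--         top_row.append((val, key)) # switched
--
--     return top_row
-- ===== SOURCE B (Python) =====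
-- def get_left_row(periphery):
--     # Two decoupled passes: group all x-values by y (first-insertion key order),
--     # then reduce each group with min. Same output as the running-minimum version.
--     groups = {}
--     for (x, y) in periphery:
--         groups.setdefault(y, []).append(x)
--     return [(min(xs), y) for y, xs in groups.items()]
-- ===== Notes on version B (the rewrite author's own statement) =====
-- stated objective: alternative
-- what changed: Replaces the running-minimum dict update (compare-and-overwrite inside the scan) by a group-by pass that collects every x per y and a separate min-reduction pass over the grouped items.
import Mathlib
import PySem

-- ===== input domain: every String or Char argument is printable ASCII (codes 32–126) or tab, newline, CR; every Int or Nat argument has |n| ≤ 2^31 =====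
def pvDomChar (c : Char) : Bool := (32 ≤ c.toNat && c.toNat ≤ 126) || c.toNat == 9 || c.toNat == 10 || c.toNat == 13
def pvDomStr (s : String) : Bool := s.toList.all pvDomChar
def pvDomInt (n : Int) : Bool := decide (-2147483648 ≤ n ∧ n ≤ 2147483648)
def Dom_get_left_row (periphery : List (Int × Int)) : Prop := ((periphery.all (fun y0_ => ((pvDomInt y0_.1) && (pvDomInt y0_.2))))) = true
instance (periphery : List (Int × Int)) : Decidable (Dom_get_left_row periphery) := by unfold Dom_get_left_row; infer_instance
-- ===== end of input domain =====

-- B replaces A's running-minimum dict update by a group-by pass (all x per y) followed by a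
-- separate min-reduction over the grouped items; same output, alternative decomposition.


-- ===== PORT A =====
-- 'top_row_vals[y]' is read only under 'y in top_row_vals', so a KeyError is impossible;
-- it is ported as getD with an unused default 0.
def get_left_row (periphery : List (Int × Int)) : List (Int × Int) :=
  let top_row_vals : PySem.Dict Int Int :=
    periphery.foldl (fun d p =>
      if d.contains p.2 then
        (if p.1 < d.getD p.2 0 then d.insert p.2 p.1 else d)
      else d.insert p.2 p.1) PySem.Dict.empty
  top_row_vals.items.foldl (fun acc p => acc ++ [(p.2, p.1)]) []

-- ===== PORT B =====
-- 'groups.setdefault(y, []).append(x)' sets groups[y] = groups.get(y, []) + [x] : Dict.modify.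
def get_left_row_alt (periphery : List (Int × Int)) : List (Int × Int) :=
  let groups : PySem.Dict Int (List Int) :=
    periphery.foldl (fun d p => d.modify p.2 [] (· ++ [p.1])) PySem.Dict.empty
  groups.items.map (fun p => ((PySem.List.min? p.2 (fun v => v)).getD 0, p.1))

-- ===== PRECONDITION & SPEC =====
def Spec_get_left_row (periphery : List (Int × Int)) (out : List (Int × Int)) : Prop := out = get_left_row_alt periphery
instance (periphery : List (Int × Int)) (out : List (Int × Int)) : Decidable (Spec_get_left_row periphery out) := by unfold Spec_get_left_row; infer_instance

-- ===== CLAIM (what is proved, stated in full; the proofs are below) =====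
def Claim_equal_get_left_row : Prop := ∀ (periphery : List (Int × Int)), Dom_get_left_row periphery → Spec_get_left_row periphery (get_left_row periphery)

-- ===== LEMMAS AND PROOFS =====

-- min(xs) as B ports it
def pvMin (xs : List Int) : Int := (PySem.List.min? xs (fun v => v)).getD 0
def pvMnP (p : Int × List Int) : Int × Int := (p.1, pvMin p.2)

lemma pvMin_append (xs : List Int) (x : Int) (h : xs ≠ []) :
    pvMin (xs ++ [x]) = if x < pvMin xs then x else pvMin xs := by
  cases xs with
  | nil => exact absurd rfl h
  | cons a t =>
    rw [show a :: t ++ [x] = a :: (t ++ [x]) from rfl]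
    simp only [pvMin, PySem.List.min?_id_cons, List.foldl_append, List.foldl_cons,
      List.foldl_nil, Option.getD_some]
    rw [min_def]
    split_ifs <;> omega

lemma get?_mk_map (l : List (Int × List Int)) (k : Int) :
    (PySem.Dict.mk (l.map pvMnP) : PySem.Dict Int Int).get? k
      = ((PySem.Dict.mk l).get? k).map pvMin := by
  induction l with
  | nil => simp [PySem.Dict.get?]
  | cons p t ih =>
    simp only [List.map_cons, pvMnP]
    rw [PySem.Dict.get?_mk_cons, PySem.Dict.get?_mk_cons]
    by_cases h : (p.1 == k) = true
    · simp [h]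
    · simp [h, ih]

lemma contains_mk_map (l : List (Int × List Int)) (k : Int) :
    (PySem.Dict.mk (l.map pvMnP) : PySem.Dict Int Int).contains k
      = (PySem.Dict.mk l).contains k := by
  simp only [PySem.Dict.contains, List.any_map]
  rfl

lemma step_eq (dB : PySem.Dict Int (List Int))
    (hne : ∀ p ∈ dB.items, p.2 ≠ []) (hnd : dB.keys.Nodup) (x y : Int) :
    (if (PySem.Dict.mk (dB.items.map pvMnP) : PySem.Dict Int Int).contains y then
        (if x < (PySem.Dict.mk (dB.items.map pvMnP) : PySem.Dict Int Int).getD y 0 then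
          (PySem.Dict.mk (dB.items.map pvMnP)).insert y x
        else PySem.Dict.mk (dB.items.map pvMnP))
      else (PySem.Dict.mk (dB.items.map pvMnP)).insert y x)
      = PySem.Dict.mk ((dB.modify y [] (· ++ [x])).items.map pvMnP) := by
  have hdB : (PySem.Dict.mk dB.items) = dB := rfl
  rw [contains_mk_map, hdB]
  by_cases hc : dB.contains y = true
  · -- key present: A compares with the running min, B appends to the group
    obtain ⟨old, hold⟩ : ∃ v, dB.get? y = some v := by
      have := PySem.Dict.get?_eq_none_iff_contains (d := dB) (k := y)
      cases hget : dB.get? y with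
      | none => rw [hget] at this; simp [this.mp rfl] at hc
      | some v => exact ⟨v, rfl⟩
    have holdmem : (y, old) ∈ dB.items := PySem.Dict.mem_items_of_get?_eq_some dB hold
    have holdne : old ≠ [] := hne _ holdmem
    have hgetD : dB.getD y [] = old := by simp [PySem.Dict.getD, hold]
    have hgA : (PySem.Dict.mk (dB.items.map pvMnP) : PySem.Dict Int Int).getD y 0 = pvMin old := by
      rw [PySem.Dict.getD_eq_get?_getD, get?_mk_map, hdB, hold]; rfl
    have hmod : (dB.modify y [] (· ++ [x])).items
        = dB.items.map (fun p => if p.1 == y then (y, old ++ [x]) else p) := by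
      simp [PySem.Dict.modify, hgetD, PySem.Dict.items_insert_of_contains dB _ hc]
    rw [hc, if_pos rfl, hgA, hmod]
    by_cases hlt : x < pvMin old
    · rw [if_pos hlt]
      apply PySem.Dict.ext
      rw [PySem.Dict.items_insert]
      have hc' : (PySem.Dict.mk (dB.items.map pvMnP) : PySem.Dict Int Int).contains y = true := by
        rw [contains_mk_map, hdB]; exact hc
      rw [if_pos hc']
      show (dB.items.map pvMnP).map (fun p => if p.1 == y then (y, x) else p) = _
      rw [List.map_map, List.map_map]
      apply List.map_congr_left
      intro p hp
      by_cases hpy : p.1 = y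
      · have hpo : p.2 = old := by
          have := PySem.Dict.getD_of_mem_items (d := dB) (k := p.1) (v := p.2)
            (by simpa using hp) hnd (d0 := [])
          rw [hpy, hgetD] at this; exact this.symm
        simp [Function.comp, pvMnP, hpy, hpo, pvMin_append old x holdne, hlt]
      · simp [Function.comp, pvMnP, hpy]
    · rw [if_neg hlt]
      apply PySem.Dict.ext
      show dB.items.map pvMnP = _
      rw [List.map_map]
      apply List.map_congr_left
      intro p hp
      by_cases hpy : p.1 = y
      · have hpo : p.2 = old := by
          have := PySem.Dict.getD_of_mem_items (d := dB) (k := p.1) (v := p.2)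
            (by simpa using hp) hnd (d0 := [])
          rw [hpy, hgetD] at this; exact this.symm
        simp [Function.comp, pvMnP, hpy, hpo, pvMin_append old x holdne, hlt]
      · simp [Function.comp, pvMnP, hpy]
  · -- fresh key: both append a new entry
    rw [if_neg hc]
    rw [Bool.not_eq_true] at hc
    apply PySem.Dict.ext
    rw [PySem.Dict.items_insert]
    have hc' : (PySem.Dict.mk (dB.items.map pvMnP) : PySem.Dict Int Int).contains y = false := by
      rw [contains_mk_map, hdB]; exact hc
    rw [hc']
    simp only [Bool.false_eq_true, if_false]
    have : (dB.modify y [] (· ++ [x])).items = dB.items ++ [(y, [] ++ [x])] := by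
      simp [PySem.Dict.modify, PySem.Dict.getD_of_not_contains dB [] hc,
        PySem.Dict.items_insert_of_not_contains dB _ hc]
    rw [this]
    simp [pvMnP, pvMin, PySem.List.min?]

lemma mod_keeps_ne (dB : PySem.Dict Int (List Int)) (hne : ∀ p ∈ dB.items, p.2 ≠ []) (x y : Int) :
    ∀ p ∈ (dB.modify y [] (· ++ [x])).items, p.2 ≠ [] := by
  intro p hp
  rw [PySem.Dict.modify] at hp
  rcases (PySem.Dict.mem_items_insert _ _ _ _).mp hp with h | ⟨h, _⟩
  · subst h; simp
  · exact hne _ h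

lemma mod_keeps_nodup (dB : PySem.Dict Int (List Int)) (hnd : dB.keys.Nodup) (x y : Int) :
    (dB.modify y [] (· ++ [x])).keys.Nodup := by
  rw [PySem.Dict.modify]; exact PySem.Dict.nodup_keys_insert _ _ _ hnd

lemma loop_inv (l : List (Int × Int)) : ∀ (dB : PySem.Dict Int (List Int)),
    (∀ p ∈ dB.items, p.2 ≠ []) → dB.keys.Nodup →
    l.foldl (fun d p =>
        if d.contains p.2 then
          (if p.1 < d.getD p.2 0 then d.insert p.2 p.1 else d)
        else d.insert p.2 p.1) (PySem.Dict.mk (dB.items.map pvMnP))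
      = PySem.Dict.mk ((l.foldl (fun d p => d.modify p.2 [] (· ++ [p.1])) dB).items.map pvMnP) := by
  induction l with
  | nil => intro dB _ _; rfl
  | cons q t ih =>
    intro dB hne hnd
    simp only [List.foldl_cons]
    rw [step_eq dB hne hnd q.1 q.2]
    exact ih _ (mod_keeps_ne dB hne q.1 q.2) (mod_keeps_nodup dB hnd q.1 q.2)

-- ===== VERDICT (by name: the statement is the Claim_ definition above) =====
theorem get_left_row_spec : Claim_equal_get_left_row := by
  intro periphery _
  show get_left_row periphery = get_left_row_alt periphery
  unfold get_left_row get_left_row_alt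
  have h := loop_inv periphery PySem.Dict.empty (by intro p hp; simp [PySem.Dict.empty] at hp)
    PySem.Dict.nodup_keys_empty
  have hempty : (PySem.Dict.mk ((PySem.Dict.empty : PySem.Dict Int (List Int)).items.map pvMnP)
      : PySem.Dict Int Int) = PySem.Dict.empty := rfl
  rw [hempty] at h
  rw [h]
  rw [PySem.List.foldl_append_singleton_eq_map]
  show ((_ : List (Int × List Int)).map pvMnP).map (fun p => (p.2, p.1)) = _
  rw [List.map_map]
  apply List.map_congr_left
  intro p _
  simp [Function.comp, pvMnP, pvMin]
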